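-- pv_equiv track=rewrite | github.com/Chogaz18/redes-neuronales | src/data/parsers.py | choose_rpeak_lead
-- ===== SOURCE A (Python) =====
-- from typing import List, Optional
--
-- def choose_rpeak_lead(lead_names: List[str], preferred: str) -> str:
--     """
--     Selecciona el lead para detección de picos R.
--     Fallback a primer lead si no existe el preferido.
--     """
--     for name in lead_names:
--         if name.strip().upper() == preferred.strip().upper():
--             return name
--     # Fallback: algunos datasets usan nombres tipo 'II' o 'Lead II'
--     preferred_upper = preferred.strip().upper()
--     for name in lead_names:
--         if preferred_upper in name.strip().upper():
--             return name
--     return lead_names[0] if lead_names else preferred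
-- ===== SOURCE B (Python) =====
-- def choose_rpeak_lead(lead_names, preferred):
--     pref = preferred.strip().upper()
--     candidate = None
--     for name in lead_names:
--         norm = name.strip().upper()
--         if norm == pref:
--             return name
--         if candidate is None and pref in norm:
--             candidate = name
--     if candidate is not None:
--         return candidate
--     return lead_names[0] if lead_names else preferred
-- ===== Notes on version B (the rewrite author's own statement) =====
-- stated objective: simpler
-- what changed: B replaces A's two sequential scans (exact pass, then substring pass with a re-normalized preferred) by one single pass that normalizes each name once, returns immediately on an exact match and remembers the first substring match as a candidate.
import Mathlib
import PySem

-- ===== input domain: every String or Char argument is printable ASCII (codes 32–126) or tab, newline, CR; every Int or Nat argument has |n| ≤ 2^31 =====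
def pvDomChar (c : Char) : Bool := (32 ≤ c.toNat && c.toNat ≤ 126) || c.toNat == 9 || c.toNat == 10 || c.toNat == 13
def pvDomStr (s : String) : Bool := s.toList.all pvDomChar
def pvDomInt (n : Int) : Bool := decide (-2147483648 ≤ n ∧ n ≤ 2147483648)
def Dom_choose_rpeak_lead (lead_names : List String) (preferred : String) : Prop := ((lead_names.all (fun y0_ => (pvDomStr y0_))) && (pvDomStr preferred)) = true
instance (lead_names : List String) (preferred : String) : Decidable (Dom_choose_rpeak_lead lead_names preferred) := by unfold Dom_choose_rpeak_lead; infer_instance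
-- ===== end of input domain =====

-- B replaces A's two sequential scans by one single pass that normalizes each name once,
-- returns on an exact match and remembers the first substring match as a candidate (objective: simpler).

-- ===== PORT A =====
-- A: first loop returns the first exact (normalized) match; second loop the first substring match;
-- then the head fallback. The two for-return loops are ported as List.find?.
def choose_rpeak_lead (lead_names : List String) (preferred : String) : String :=
  match lead_names.find? (fun name =>
      PySem.Str.upper (PySem.Str.strip name) == PySem.Str.upper (PySem.Str.strip preferred)) with
  | some name => name
  | none =>
    let preferred_upper := PySem.Str.upper (PySem.Str.strip preferred)
    match lead_names.find? (fun name =>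
        PySem.Str.isIn preferred_upper (PySem.Str.upper (PySem.Str.strip name))) with
    | some name => name
    | none =>
      match lead_names with
      | [] => preferred
      | x :: _ => x

-- ===== PORT B =====
-- B's loop: exact match returns the name; first substring match is recorded in `cand`.
def chooseAltLoop (pref : String) (names : List String) (cand : Option String) : Option String :=
  match names with
  | [] => cand
  | n :: rest =>
    let norm := PySem.Str.upper (PySem.Str.strip n)
    if norm == pref then some n
    else if cand.isNone && PySem.Str.isIn pref norm then chooseAltLoop pref rest (some n)
    else chooseAltLoop pref rest cand

def choose_rpeak_lead_alt (lead_names : List String) (preferred : String) : String :=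
  let pref := PySem.Str.upper (PySem.Str.strip preferred)
  match chooseAltLoop pref lead_names none with
  | some s => s
  | none =>
    match lead_names with
    | [] => preferred
    | x :: _ => x

-- ===== PRECONDITION & SPEC =====
def Spec_choose_rpeak_lead (lead_names : List String) (preferred : String) (out : String) : Prop := out = choose_rpeak_lead_alt lead_names preferred
instance (lead_names : List String) (preferred : String) (out : String) : Decidable (Spec_choose_rpeak_lead lead_names preferred out) := by unfold Spec_choose_rpeak_lead; infer_instance

-- ===== CLAIM (what is proved, stated in full; the proofs are below) =====
def Claim_equal_choose_rpeak_lead : Prop := ∀ (lead_names : List String) (preferred : String), Dom_choose_rpeak_lead lead_names preferred → Spec_choose_rpeak_lead lead_names preferred (choose_rpeak_lead lead_names preferred)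

-- ===== LEMMAS AND PROOFS =====

-- B's single accumulator loop equals: first exact match, else the candidate held so far, else first substring match.
theorem chooseAltLoop_eq (pref : String) (names : List String) (cand : Option String) :
    chooseAltLoop pref names cand =
      match names.find? (fun n => PySem.Str.upper (PySem.Str.strip n) == pref) with
      | some n => some n
      | none =>
        match cand with
        | some c => some c
        | none => names.find? (fun n => PySem.Str.isIn pref (PySem.Str.upper (PySem.Str.strip n)))
      := by
  induction names generalizing cand with
  | nil => cases cand <;> simp [chooseAltLoop]
  | cons n rest ih =>
    simp only [chooseAltLoop, List.find?]
    by_cases hx : (PySem.Str.upper (PySem.Str.strip n) == pref) = true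
    · simp [hx]
    · simp only [hx, Bool.false_eq_true, if_false]
      cases cand with
      | some c => simp [ih]
      | none =>
        cases hs : PySem.Chars.isIn pref.toList (PySem.Chars.upper (PySem.Chars.strip n.toList)) with
        | true => simp [hs, ih]
        | false => simp [hs, ih]

-- ===== VERDICT (by name: the statement is the Claim_ definition above) =====
theorem choose_rpeak_lead_spec : Claim_equal_choose_rpeak_lead := by
  intro lead_names preferred _
  unfold Spec_choose_rpeak_lead choose_rpeak_lead choose_rpeak_lead_alt
  simp only [chooseAltLoop_eq]
  cases h1 : lead_names.find? (fun n =>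
      PySem.Str.upper (PySem.Str.strip n) == PySem.Str.upper (PySem.Str.strip preferred)) with
  | some n => rfl
  | none => rfl
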